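-- pv_equiv track=rewrite | github.com/pypi-data/pypi-mirror-6 | packages/ail/ail-0.2.4.tar.gz/ail-0.2.4/ail/platforms/equallogic/parse_show.py | remove_col_wrap
-- ===== SOURCE A (Python) =====
-- def remove_col_wrap(column_spec, column_names, rows):
--     """Given a set of rows and column widths, concatentate the fields of each
--     column until the number of fields equals the number of columns. If two rows
--     each contain five fields in five columns, this function returns one row of
--     five fields in five columns. Any leading/trailing spaces are removed.
--
--     This::
--
--        a    b         c  d e
--      ['----|---------|--|-|----------',
--       ' ---|  -------|--|-| -----------']
--
--     becomes::
--
--      {'a': '-------',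
--       'b': '-------',
--       'c': '----------------',
--       'd': '----',
--       'e': '--',
--       'f': '---------------------'}
--
--     :param column_spec: row widths stored as int
--     :type column_spec: list of int
--     :param column_names: used as keys to build record dict
--     :type column_names: list of str
--     :param rows: rows of a column-wrapped record
--     """
--     record = {}
--     offset = 0
--
--     for col_width, col_name in zip(column_spec, column_names):
--         column = ''
--         # Strip line ends and left justify so len(row) == sum(column_spec)
--         for row in (r.rstrip('\n\r').ljust(sum(column_spec)) for r in rows):
--             # Concatenate lines in the current column
--             col_slice = slice(offset, offset + col_width)
--             column += row[col_slice].strip()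
--         # Add column to record and set offset for next column
--         record[col_name] = column
--         offset += col_width + 1
--
--     return record
-- ===== SOURCE B (Python) =====
-- def remove_col_wrap(column_spec, column_names, rows):
--     # Row-major pass: pad each row once and split it into ALL its fields in one
--     # sweep (precomputed column bounds), accumulating fields per column, then
--     # join each column at the end.
--     total = sum(column_spec)
--     n = min(len(column_spec), len(column_names))
--     bounds = []
--     offset = 0
--     for w in column_spec[:n]:
--         bounds.append((offset, offset + w))
--         offset += w + 1
--     parts = [[] for _ in range(n)]
--     for r in rows:
--         row = r.rstrip('\n\r').ljust(total)
--         for i, (a, b) in enumerate(bounds):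
--             parts[i].append(row[a:b].strip())
--     return {name: ''.join(p) for name, p in zip(column_names, parts)}
-- ===== Notes on version B (the rewrite author's own statement) =====
-- stated objective: faster
-- what changed: B traverses row-major instead of A's column-major: it precomputes the column bounds once, pads each row a single time and splits it into all its fields in one sweep, accumulating per-column field lists that are joined at the end, instead of A's outer loop over columns that re-strips and re-pads every row (recomputing sum(column_spec)) for each column.
import Mathlib
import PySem

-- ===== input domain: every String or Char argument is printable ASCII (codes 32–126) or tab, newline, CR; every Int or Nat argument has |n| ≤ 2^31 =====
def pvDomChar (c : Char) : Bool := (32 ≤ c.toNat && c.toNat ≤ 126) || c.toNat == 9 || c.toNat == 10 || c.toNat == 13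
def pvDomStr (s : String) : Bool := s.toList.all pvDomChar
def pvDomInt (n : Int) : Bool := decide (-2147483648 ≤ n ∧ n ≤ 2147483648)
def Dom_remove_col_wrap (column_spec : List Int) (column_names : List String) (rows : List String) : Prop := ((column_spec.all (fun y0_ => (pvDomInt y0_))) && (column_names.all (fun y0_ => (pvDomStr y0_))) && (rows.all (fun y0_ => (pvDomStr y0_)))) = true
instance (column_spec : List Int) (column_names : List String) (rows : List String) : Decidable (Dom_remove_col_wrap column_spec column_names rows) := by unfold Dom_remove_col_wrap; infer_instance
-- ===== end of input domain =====

-- B traverses row-major (pad each row once, split it into all fields in one sweep)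
-- instead of A's column-major re-padding; objective: faster (see claim).

-- ===== PORT A =====
-- r.rstrip('\n\r') on List Char (exact: CPython drops trailing chars from the given set)
def pvRstripNLCR (cs : List Char) : List Char :=
  (cs.reverse.dropWhile (fun c => c == '\n' || c == '\r')).reverse
-- s.ljust(n) on List Char (exact: pads with spaces to width n; no change if len >= n or n <= 0)
def pvLjust (cs : List Char) (n : Int) : List Char :=
  cs ++ List.replicate (n.toNat - cs.length) ' '

def remove_col_wrap (column_spec : List Int) (column_names : List String) (rows : List String) : List (String × String) :=
  let st := (column_spec.zip column_names).foldl
    (fun (st : PySem.Dict String String × Int) p =>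
      let record := st.1
      let offset := st.2
      let col_width := p.1
      let col_name := p.2
      -- for row in (r.rstrip('\n\r').ljust(sum(column_spec)) for r in rows): column += row[offset:offset+col_width].strip()
      let column := rows.foldl
        (fun column r =>
          let row := pvLjust (pvRstripNLCR r.toList) column_spec.sum
          column ++ PySem.Chars.strip (PySem.List.slice row (some offset) (some (offset + col_width))))
        []
      (record.insert col_name (String.ofList column), offset + col_width + 1))
    (PySem.Dict.empty, 0)
  st.1.items

-- ===== PORT B =====
def remove_col_wrap_alt (column_spec : List Int) (column_names : List String) (rows : List String) : List (String × String) :=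
  let total := column_spec.sum
  let n := min column_spec.length column_names.length
  -- bounds = []; offset = 0; for w in column_spec[:n]: bounds.append((offset, offset+w)); offset += w+1
  let bounds := ((column_spec.take n).foldl
      (fun (st : List (Int × Int) × Int) w => (st.1 ++ [(st.2, st.2 + w)], st.2 + w + 1))
      ([], 0)).1
  -- parts = [[] for _ in range(n)]; for r in rows: row = ...; for i,(a,b) in enumerate(bounds): parts[i].append(row[a:b].strip())
  let parts := rows.foldl
    (fun (parts : List (List (List Char))) r =>
      let row := pvLjust (pvRstripNLCR r.toList) total
      List.zipWith
        (fun p ab => p ++ [PySem.Chars.strip (PySem.List.slice row (some ab.1) (some ab.2))])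
        parts bounds)
    (List.replicate n [])
  -- {name: ''.join(p) for name, p in zip(column_names, parts)}
  ((column_names.zip parts).foldl
    (fun (d : PySem.Dict String String) np =>
      d.insert np.1 (String.ofList (PySem.Chars.join [] np.2)))
    PySem.Dict.empty).items

-- ===== PRECONDITION & SPEC =====
def Spec_remove_col_wrap (column_spec : List Int) (column_names : List String) (rows : List String) (out : List (String × String)) : Prop := out = remove_col_wrap_alt column_spec column_names rows
instance (column_spec : List Int) (column_names : List String) (rows : List String) (out : List (String × String)) : Decidable (Spec_remove_col_wrap column_spec column_names rows out) := by unfold Spec_remove_col_wrap; infer_instance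

-- ===== CLAIM (what is proved, stated in full; the proofs are below) =====
def Claim_equal_remove_col_wrap : Prop := ∀ (column_spec : List Int) (column_names : List String) (rows : List String), Dom_remove_col_wrap column_spec column_names rows → Spec_remove_col_wrap column_spec column_names rows (remove_col_wrap column_spec column_names rows)

-- ===== LEMMAS AND PROOFS =====
-- the stripped slice of the padded row: the field of row r in the column [a,b)
def pvField (total : Int) (r : String) (ab : Int × Int) : List Char :=
  PySem.Chars.strip (PySem.List.slice (pvLjust (pvRstripNLCR r.toList) total) (some ab.1) (some ab.2))

-- direct recursion computing B's bounds list from the starting offset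
def pvBoundsList (o : Int) : List Int → List (Int × Int)
  | [] => []
  | w :: ws => (o, o + w) :: pvBoundsList (o + w + 1) ws

theorem pvBoundsFold (ws : List Int) (acc : List (Int × Int)) (o : Int) :
    (ws.foldl (fun (st : List (Int × Int) × Int) w => (st.1 ++ [(st.2, st.2 + w)], st.2 + w + 1)) (acc, o)).1
      = acc ++ pvBoundsList o ws := by
  induction ws generalizing acc o with
  | nil => simp [pvBoundsList]
  | cons w ws ih => simp [pvBoundsList, List.foldl_cons, ih]

theorem pvBoundsLen (o : Int) (ws : List Int) : (pvBoundsList o ws).length = ws.length := by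
  induction ws generalizing o with
  | nil => rfl
  | cons w ws ih => simp [pvBoundsList, ih]

theorem pvZipWithMap {α β : Type} (g : β → α → β) (h : α → β) (l : List α) :
    List.zipWith g (l.map h) l = l.map (fun a => g (h a) a) := by
  induction l with
  | nil => rfl
  | cons x xs ih => simp [ih]

-- one row-major fold step over all columns, as a map over bounds
theorem pvPartsEq (rows : List String) (total : Int) (bounds : List (Int × Int))
    (g : Int × Int → List (List Char)) :
    rows.foldl
      (fun (parts : List (List (List Char))) r =>
        List.zipWith
          (fun p ab => p ++ [PySem.Chars.strip (PySem.List.slice (pvLjust (pvRstripNLCR r.toList) total) (some ab.1) (some ab.2))])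
          parts bounds)
      (bounds.map g)
    = bounds.map (fun ab => g ab ++ rows.map (fun r => pvField total r ab)) := by
  induction rows generalizing g with
  | nil => simp
  | cons r rs ih =>
    simp only [List.foldl_cons, List.map_cons]
    rw [pvZipWithMap]
    rw [ih (fun ab => g ab ++ [PySem.Chars.strip (PySem.List.slice (pvLjust (pvRstripNLCR r.toList) total) (some ab.1) (some ab.2))])]
    simp [pvField]

-- ''.join(xs) = flatten
theorem pvJoinNil (l : List (List Char)) : PySem.Chars.join [] l = l.flatten := by
  induction l with
  | nil => rfl
  | cons x xs ih =>
    cases xs with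
    | nil => simp [PySem.Chars.join, List.intercalate]
    | cons y ys =>
      rw [PySem.Chars.join_cons_cons]
      simp only [List.flatten_cons] at ih ⊢
      rw [ih]; simp

-- A's accumulated column equals the join of B's per-row fields
theorem pvColumnEq (rows : List String) (total o w : Int) :
    rows.foldl
      (fun column r =>
        column ++ PySem.Chars.strip (PySem.List.slice (pvLjust (pvRstripNLCR r.toList) total) (some o) (some (o + w))))
      []
    = PySem.Chars.join [] (rows.map (fun r => pvField total r (o, o + w))) := by
  rw [pvJoinNil,
      PySem.List.foldl_append_eq_flatMap
        (fun r => PySem.Chars.strip (PySem.List.slice (pvLjust (pvRstripNLCR r.toList) total) (some o) (some (o + w)))) rows []]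
  simp [List.flatMap_def, pvField]

-- main induction: A's column-major dict fold = B's dict fold over the row-major parts
theorem pvMain (spec : List Int) (names : List String) (rows : List String) (total : Int)
    (o : Int) (d : PySem.Dict String String) :
    ((spec.zip names).foldl
      (fun (st : PySem.Dict String String × Int) p =>
        (st.1.insert p.2 (String.ofList (rows.foldl
          (fun column r =>
            column ++ PySem.Chars.strip (PySem.List.slice (pvLjust (pvRstripNLCR r.toList) total) (some st.2) (some (st.2 + p.1))))
          [])), st.2 + p.1 + 1))
      (d, o)).1
    = (names.zip ((pvBoundsList o (spec.take (min spec.length names.length))).map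
          (fun ab => rows.map (fun r => pvField total r ab)))).foldl
        (fun d np => d.insert np.1 (String.ofList (PySem.Chars.join [] np.2))) d := by
  induction spec generalizing names o d with
  | nil => simp [pvBoundsList]
  | cons w ws ih =>
    cases names with
    | nil => simp [pvBoundsList]
    | cons c cs =>
      have hmin : min (w :: ws).length (c :: cs).length = (min ws.length cs.length) + 1 := by
        simp [List.length_cons]
      rw [hmin]
      simp only [List.zip_cons_cons, List.foldl_cons, List.take_succ_cons, pvBoundsList, List.map_cons]
      rw [pvColumnEq rows total o w]
      exact ih cs (o + w + 1) (d.insert c (String.ofList (PySem.Chars.join [] (rows.map (fun r => pvField total r (o, o + w))))))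

-- ===== VERDICT (by name: the statement is the Claim_ definition above) =====
theorem remove_col_wrap_spec : Claim_equal_remove_col_wrap := by
  intro column_spec column_names rows _
  unfold Spec_remove_col_wrap remove_col_wrap remove_col_wrap_alt
  simp only []
  rw [pvBoundsFold]
  simp only [List.nil_append]
  have hlen : (List.replicate (min column_spec.length column_names.length) ([] : List (List Char)))
      = (pvBoundsList 0 (column_spec.take (min column_spec.length column_names.length))).map (fun _ => []) := by
    rw [List.map_const', pvBoundsLen, List.length_take]
    congr 1
    omega
  rw [hlen, pvPartsEq rows column_spec.sum _ (fun _ => [])]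
  simp only [List.nil_append]
  congr 1
  exact pvMain column_spec column_names rows column_spec.sum 0 PySem.Dict.empty
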